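-- pv_equiv track=rewrite | github.com/DevPrasath6/AI-Agent-Framework | reference_agents/security_monitoring_agent.py | _classify_incident_severity
-- ===== SOURCE A (Python) =====
-- from typing import Dict, List, Any, Optional, Set
--
-- def _classify_incident_severity(events: List[Dict]) -> str:
--     """Classify overall incident severity."""
--     if any("critical" in event.get("message", "").lower() for event in events):
--         return "critical"
--     elif any("high" in event.get("message", "").lower() for event in events):
--         return "high"
--     elif len(events) > 10:
--         return "medium"
--     else:
--         return "low"
-- ===== SOURCE B (Python) =====
-- from typing import Dict, List, Any, Optional, Set
--
-- _LEVELS = ("low", "medium", "high", "critical")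
--
-- def _score(event) -> int:
--     msg = event.get("message", "").lower()
--     if "critical" in msg:
--         return 3
--     if "high" in msg:
--         return 2
--     return 0
--
-- def _classify_incident_severity(events: List[Dict]) -> str:
--     """Classify overall incident severity by numeric max-scoring."""
--     base = 1 if len(events) > 10 else 0
--     level = max([base] + [_score(e) for e in events])
--     return _LEVELS[level]
-- ===== Notes on version B (the rewrite author's own statement) =====
-- stated objective: alternative
-- what changed: Replaces the prioritized chain of any() scans with numeric max-scoring: each event is mapped to a severity rank (critical=3, high=2, else 0), the count threshold gives a base rank (medium=1), and the result is a single max over ranks indexed into a severity table.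
import Mathlib
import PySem

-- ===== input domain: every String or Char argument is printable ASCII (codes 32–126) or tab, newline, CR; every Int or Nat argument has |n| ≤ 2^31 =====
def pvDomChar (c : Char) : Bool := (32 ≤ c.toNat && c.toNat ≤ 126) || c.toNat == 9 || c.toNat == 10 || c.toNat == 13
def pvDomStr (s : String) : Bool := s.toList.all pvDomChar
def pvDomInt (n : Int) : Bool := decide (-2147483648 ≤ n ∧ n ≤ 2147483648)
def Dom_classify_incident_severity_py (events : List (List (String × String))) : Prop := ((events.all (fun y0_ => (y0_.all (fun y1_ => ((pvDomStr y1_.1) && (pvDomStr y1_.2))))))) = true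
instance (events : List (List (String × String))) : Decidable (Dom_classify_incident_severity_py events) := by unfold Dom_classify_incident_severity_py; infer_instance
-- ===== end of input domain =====

-- B replaces A's prioritized chain of any() scans by numeric max-scoring:
-- each event gets a rank (critical=3, high=2, else 0), the count threshold a base rank
-- (medium=1), and one max over all ranks indexes a severity table (alternative decomposition).

-- ===== PORT A =====
def classify_incident_severity_py (events : List (List (String × String))) : String :=
  if events.any (fun event => PySem.Str.isIn "critical" (PySem.Str.lower ((PySem.Dict.mk event).getD "message" ""))) then
    "critical"
  else if events.any (fun event => PySem.Str.isIn "high" (PySem.Str.lower ((PySem.Dict.mk event).getD "message" ""))) then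
    "high"
  else if (events.length : Int) > 10 then
    "medium"
  else
    "low"

-- ===== PORT B =====
def pvScore (event : List (String × String)) : Nat :=
  let msg := PySem.Str.lower ((PySem.Dict.mk event).getD "message" "")
  if PySem.Str.isIn "critical" msg then 3
  else if PySem.Str.isIn "high" msg then 2
  else 0

def classify_incident_severity_py_alt (events : List (List (String × String))) : String :=
  -- level = max([base] + scores), ported as a left fold of Nat.max seeded with base
  ["low", "medium", "high", "critical"].getD
    ((events.map pvScore).foldl Nat.max (if (events.length : Int) > 10 then 1 else 0)) "low"

-- ===== PRECONDITION & SPEC =====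
def Spec_classify_incident_severity_py (events : List (List (String × String))) (out : String) : Prop := out = classify_incident_severity_py_alt events
instance (events : List (List (String × String))) (out : String) : Decidable (Spec_classify_incident_severity_py events out) := by unfold Spec_classify_incident_severity_py; infer_instance

-- ===== CLAIM (what is proved, stated in full; the proofs are below) =====
def Claim_equal_classify_incident_severity_py : Prop := ∀ (events : List (List (String × String))), Dom_classify_incident_severity_py events → Spec_classify_incident_severity_py events (classify_incident_severity_py events)

-- ===== LEMMAS AND PROOFS =====

-- Pull the seed out of a Nat.max fold.
theorem foldl_max_seed (l : List Nat) (b : Nat) :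
    l.foldl Nat.max b = Nat.max b (l.foldl Nat.max 0) := by
  induction l generalizing b with
  | nil => simp
  | cons x xs ih =>
    simp only [List.foldl]
    rw [ih (Nat.max b x), ih (Nat.max 0 x)]
    simp [Nat.max_assoc]

-- The max of mapped 3/2/0-ranks is determined by the two any-predicates.
theorem foldl_max_three {α : Type} (p q : α → Bool) (l : List α) :
    (l.map (fun x => if p x then 3 else if q x then 2 else 0)).foldl Nat.max 0 =
      if l.any p then 3 else if l.any q then 2 else 0 := by
  induction l with
  | nil => simp
  | cons x xs ih =>
    simp only [List.map, List.foldl, List.any_cons]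
    rw [foldl_max_seed, ih]
    by_cases hp : p x = true <;> by_cases hq : q x = true <;>
      by_cases hps : xs.any p = true <;> by_cases hqs : xs.any q = true <;>
      simp [hp, hq, hps, hqs]

-- ===== VERDICT (by name: the statement is the Claim_ definition above) =====
theorem classify_incident_severity_py_spec : Claim_equal_classify_incident_severity_py := by
  intro events _
  unfold Spec_classify_incident_severity_py classify_incident_severity_py classify_incident_severity_py_alt
  have hmap : events.map pvScore = events.map (fun event =>
      if PySem.Str.isIn "critical" (PySem.Str.lower ((PySem.Dict.mk event).getD "message" "")) then 3
      else if PySem.Str.isIn "high" (PySem.Str.lower ((PySem.Dict.mk event).getD "message" "")) then 2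
      else 0) := by
    simp [pvScore]
  rw [hmap, foldl_max_seed, foldl_max_three]
  by_cases h1 : (events.any fun event => PySem.Str.isIn "critical" (PySem.Str.lower ((PySem.Dict.mk event).getD "message" ""))) = true <;>
    by_cases h2 : (events.any fun event => PySem.Str.isIn "high" (PySem.Str.lower ((PySem.Dict.mk event).getD "message" ""))) = true <;>
    by_cases h3 : (events.length : Int) > 10 <;>
    simp only [h1, h2, h3, if_true, if_false] <;> rfl
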